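-- pv_equiv track=rewrite | github.com/MayJarung/OOD | Sort/testDOntCareNegative.py | dontCareNegative
-- ===== SOURCE A (Python) =====
-- def dontCareNegative(L):
--     for outerLoop in range(len(L)-1,0,-1):
--         for i in range(outerLoop):
--             swap = False
--             count = 0
--             while swap is False and i + count < len(L):
--                 if L[i] > L[i+count] and L[i] >= 0 and L[i+count] >= 0:
--                     L[i],L[i+count] = L[i+count],L[i]
--                     swap = True
--                 else:
--                     count += 1
--     return L
-- ===== SOURCE B (Python) =====
-- def dontCareNegative(L):
--     vals = []
--     for x in L:
--         if x >= 0: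
--             vals.append(x)
--     vals = sorted(vals)
--     j = 0
--     for idx in range(len(L)):
--         if L[idx] >= 0:
--             L[idx] = vals[j]
--             j += 1
--     return L
-- ===== Notes on version B (the rewrite author's own statement) =====
-- stated objective: faster
-- what changed: Replaced A's repeated in-place passes of first-smaller-later swaps (triple nested loop) by gather the non-negative values, sort them once, and scatter them back over the non-negative positions.
import Mathlib
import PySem

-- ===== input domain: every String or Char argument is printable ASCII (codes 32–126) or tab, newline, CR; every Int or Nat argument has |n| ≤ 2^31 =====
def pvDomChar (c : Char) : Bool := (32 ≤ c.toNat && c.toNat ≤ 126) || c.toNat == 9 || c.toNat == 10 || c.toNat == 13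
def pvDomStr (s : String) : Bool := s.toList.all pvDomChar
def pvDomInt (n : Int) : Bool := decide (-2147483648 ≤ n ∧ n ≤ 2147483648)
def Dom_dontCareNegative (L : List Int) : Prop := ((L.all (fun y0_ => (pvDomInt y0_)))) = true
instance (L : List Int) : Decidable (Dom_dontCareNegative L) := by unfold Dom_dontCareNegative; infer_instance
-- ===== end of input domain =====

-- B replaces A's triple-nested in-place swap passes by gather/sort/scatter (objective: faster).
-- A mutates its argument in place in Python; the equivalence proved here is about the return
-- value only (B performs the same in-place overwrite of L in Python).

-- ===== PORT A =====
-- the inner `while swap is False and i+count < len(L)` loop of A; all indices the Python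
-- code reads are in range there, so `getD _ 0` is exact.
def pvWhile (Q : List Int) (i count : Nat) : List Int :=
  if _h : i + count < Q.length then
    if Q.getD i 0 > Q.getD (i + count) 0 ∧ 0 ≤ Q.getD i 0 ∧ 0 ≤ Q.getD (i + count) 0 then
      (Q.set i (Q.getD (i + count) 0)).set (i + count) (Q.getD i 0)
    else pvWhile Q i (count + 1)
  else Q
termination_by Q.length - (i + count)

def dontCareNegative (L : List Int) : List Int :=
  (PySem.List.pyRange ((L.length : Int) - 1) 0 (-1)).foldl
    (fun acc outerLoop =>
      -- i from range(outerLoop) is nonnegative, so `.toNat` is exact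
      (PySem.List.pyRange 0 outerLoop 1).foldl (fun acc2 i => pvWhile acc2 i.toNat 0) acc)
    L

-- ===== PORT B =====
-- gather the non-negative values, sort them once, scatter them back over the
-- non-negative positions; `idx` from range(len(L)) is nonnegative and `vals[j]` is
-- always in range in the Python, so `.toNat` / `getD _ 0` are exact.
def dontCareNegative_alt (L : List Int) : List Int :=
  let vals := L.foldl (fun acc x => if 0 ≤ x then acc ++ [x] else acc) []
  let svals := PySem.List.sorted vals (fun x => x) false
  ((PySem.List.pyRange 0 (L.length : Int) 1).foldl
      (fun (st : List Int × Nat) idx =>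
        if 0 ≤ st.1.getD idx.toNat 0 then (st.1.set idx.toNat (svals.getD st.2 0), st.2 + 1)
        else st)
      (L, 0)).1

-- ===== PRECONDITION & SPEC =====
def Spec_dontCareNegative (L : List Int) (out : List Int) : Prop := out = dontCareNegative_alt L
instance (L : List Int) (out : List Int) : Decidable (Spec_dontCareNegative L out) := by unfold Spec_dontCareNegative; infer_instance

-- ===== CLAIM (what is proved, stated in full; the proofs are below) =====
def Claim_equal_dontCareNegative : Prop := ∀ (L : List Int), Dom_dontCareNegative L → Spec_dontCareNegative L (dontCareNegative L)

-- ===== LEMMAS AND PROOFS =====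

/-- `Q.getD p 0` as a total indexing function (all proof-side index reasoning uses it). -/
def getI (Q : List Int) (p : Nat) : Int := Q.getD p 0

/-- the swap A performs. -/
def swapAt (Q : List Int) (i j : Nat) : List Int := (Q.set i (Q.getD j 0)).set j (Q.getD i 0)

/-- the non-negative subsequence. -/
def nnf (Q : List Int) : List Int := Q.filter (fun x => decide (0 ≤ x))

/-- `R` is reachable from `Q` by A's swaps: same length, negatives fixed in place,
    non-negative positions keep non-negative values, and the non-negative subsequence
    is a permutation. -/
def Shape (Q R : List Int) : Prop :=
  R.length = Q.length ∧
  ∀ p, p < Q.length → (getI Q p < 0 → getI R p = getI Q p) ∧ (0 ≤ getI Q p → 0 ≤ getI R p)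

def Reach (Q R : List Int) : Prop := Shape Q R ∧ (nnf R).Perm (nnf Q)

/-- every non-negative entry at a position `≥ k` dominates every non-negative entry before it. -/
def DomGe (k : Nat) (Q : List Int) : Prop :=
  ∀ p q, p < q → q < Q.length → k ≤ q → 0 ≤ getI Q p → 0 ≤ getI Q q → getI Q p ≤ getI Q q

/-- A's inner `for i in range(outerLoop)` loop, from step `t` on (Nat-indexed form). -/
def PassFrom (Q : List Int) (t k : Nat) : List Int :=
  if t < k then PassFrom (pvWhile Q t 0) (t + 1) k else Q
termination_by k - t

/-- A's outer loop: passes `k, k-1, …, 1` (Nat-indexed form). -/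
def OuterRec : Nat → List Int → List Int
  | 0, Q => Q
  | k + 1, Q => OuterRec k (PassFrom Q 0 (k + 1))

/-- B's scatter, structurally. -/
def scat : List Int → List Int → List Int
  | [], _ => []
  | x :: xs, vs => if 0 ≤ x then vs.headD 0 :: scat xs vs.tail else x :: scat xs vs

-- basic getI lemmas
theorem getI_cons_zero (a : Int) (Q : List Int) : getI (a :: Q) 0 = a := rfl
theorem getI_cons_succ (a : Int) (Q : List Int) (p : Nat) : getI (a :: Q) (p + 1) = getI Q p := rfl
theorem getI_eq_getElem (Q : List Int) (p : Nat) (h : p < Q.length) : getI Q p = Q[p] := by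
  simp [getI, List.getD_eq_getElem?_getD, List.getElem?_eq_getElem h]

theorem mem_nnf {y : Int} {Q : List Int} : y ∈ nnf Q ↔ y ∈ Q ∧ 0 ≤ y := by
  simp [nnf, List.mem_filter]

theorem length_swapAt (Q : List Int) (i j : Nat) : (swapAt Q i j).length = Q.length := by
  simp [swapAt]

theorem swapAt_perm (Q : List Int) (i j : Nat) (hi : i < Q.length) (hj : j < Q.length) :
    (swapAt Q i j).Perm Q := by
  have h := Array.swap_perm (xs := Q.toArray) (i := i) (j := j) (by simpa) (by simpa)
  rw [Array.perm_iff_toList_perm] at h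
  have e : (Q.toArray.swap i j (by simpa) (by simpa)).toList = swapAt Q i j := by
    simp [swapAt, Array.swap, List.getD_eq_getElem?_getD, hi, hj]
  rw [e] at h; simpa using h

theorem getI_swapAt (Q : List Int) (i j p : Nat) (hi : i < Q.length) (hj : j < Q.length)
    (hij : i ≠ j) :
    getI (swapAt Q i j) p = if p = j then getI Q i else if p = i then getI Q j else getI Q p := by
  unfold swapAt getI
  simp only [List.getD_eq_getElem?_getD]
  split_ifs with h1 h2
  · subst h1
    rw [List.getElem?_set_self (by simpa using hj)]
    rfl
  · subst h2
    rw [List.getElem?_set_ne (fun h => absurd h.symm h1), List.getElem?_set_self hi]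
    rfl
  · rw [List.getElem?_set_ne (fun h => absurd h.symm h1),
      List.getElem?_set_ne (fun h => absurd h.symm h2)]

theorem Shape_refl (Q : List Int) : Shape Q Q := ⟨rfl, fun _ _ => ⟨fun _ => rfl, fun h => h⟩⟩

theorem Reach_refl (Q : List Int) : Reach Q Q := ⟨Shape_refl Q, List.Perm.refl _⟩

theorem Reach_trans {Q R S : List Int} (h1 : Reach Q R) (h2 : Reach R S) : Reach Q S := by
  obtain ⟨⟨hl1, hp1⟩, hperm1⟩ := h1
  obtain ⟨⟨hl2, hp2⟩, hperm2⟩ := h2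
  refine ⟨⟨hl2.trans hl1, fun p hp => ?_⟩, hperm2.trans hperm1⟩
  obtain ⟨hneg1, hpos1⟩ := hp1 p hp
  obtain ⟨hneg2, hpos2⟩ := hp2 p (hl1 ▸ hp)
  constructor
  · intro hneg
    rw [hneg2 (by rw [hneg1 hneg]; exact hneg), hneg1 hneg]
  · exact fun h => hpos2 (hpos1 h)

theorem Reach_swapAt (Q : List Int) (i j : Nat) (hi : i < Q.length) (hj : j < Q.length)
    (hij : i ≠ j) (hnni : 0 ≤ getI Q i) (hnnj : 0 ≤ getI Q j) : Reach Q (swapAt Q i j) := by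
  refine ⟨⟨length_swapAt .., fun p hp => ?_⟩, List.Perm.filter _ (swapAt_perm Q i j hi hj)⟩
  rw [getI_swapAt Q i j p hi hj hij]
  split_ifs with h1 h2
  · exact ⟨fun hneg => absurd (h1 ▸ hneg) (by omega), fun _ => hnni⟩
  · exact ⟨fun hneg => absurd (h2 ▸ hneg) (by omega), fun _ => hnnj⟩
  · exact ⟨fun _ => rfl, fun h => h⟩

-- the while-loop characterisation: no swap fired (and every later non-negative is ≥ Q[i]),
-- or the first admissible j was swapped
theorem pvWhile_spec (Q : List Int) (i : Nat) : ∀ (d c : Nat), d = Q.length - (i + c) →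
    (pvWhile Q i c = Q ∧
      ∀ j, i + c ≤ j → j < Q.length → 0 ≤ getI Q i → 0 ≤ getI Q j → getI Q i ≤ getI Q j) ∨
    (∃ j, i + c ≤ j ∧ j < Q.length ∧ getI Q j < getI Q i ∧ 0 ≤ getI Q i ∧ 0 ≤ getI Q j ∧
      (∀ j', i + c ≤ j' → j' < j → 0 ≤ getI Q j' → getI Q i ≤ getI Q j') ∧
      pvWhile Q i c = swapAt Q i j) := by
  intro d
  induction d using Nat.strong_induction_on with
  | _ d ih =>
    intro c hd
    by_cases hin : i + c < Q.length
    · by_cases hcond : Q.getD i 0 > Q.getD (i + c) 0 ∧ 0 ≤ Q.getD i 0 ∧ 0 ≤ Q.getD (i + c) 0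
      · right
        refine ⟨i + c, le_refl _, hin, hcond.1, hcond.2.1, hcond.2.2, ?_, ?_⟩
        · intro j' h1 h2 _; omega
        · rw [pvWhile, dif_pos hin, if_pos hcond]; rfl
      · have hstep : pvWhile Q i c = pvWhile Q i (c + 1) := by
          rw [pvWhile, dif_pos hin, if_neg hcond]
        have hle : ∀ h0 : 0 ≤ getI Q i, 0 ≤ getI Q (i + c) → getI Q i ≤ getI Q (i + c) := by
          intro h0 h1
          by_contra hc
          exact hcond ⟨by simpa [getI] using hc, h0, h1⟩
        rcases ih (Q.length - (i + (c + 1))) (by omega) (c + 1) rfl with ⟨heq, hall⟩ | ⟨j, hj1, hj2, hj3, hj4, hj5, hj6, hj7⟩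
        · left
          refine ⟨hstep.trans heq, fun j hj hjl h0 h1 => ?_⟩
          rcases Nat.lt_or_ge j (i + c + 1) with h' | h'
          · have : j = i + c := by omega
            subst this; exact hle h0 h1
          · exact hall j (by omega) hjl h0 h1
        · right
          refine ⟨j, by omega, hj2, hj3, hj4, hj5, fun j' h1 h2 h3 => ?_, hstep.trans hj7⟩
          rcases Nat.lt_or_ge j' (i + c + 1) with h' | h'
          · have : j' = i + c := by omega
            subst this; exact hle hj4 h3
          · exact hj6 j' (by omega) h2 h3
    · left
      constructor
      · rw [pvWhile, dif_neg hin]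
      · intro j h1 h2; omega

-- existence of a maximal non-negative entry among positions ≤ k
theorem maxex (k : Nat) (Q : List Int) (h : ∃ m, m ≤ k ∧ 0 ≤ getI Q m) :
    ∃ m, m ≤ k ∧ 0 ≤ getI Q m ∧ ∀ p, p ≤ k → 0 ≤ getI Q p → getI Q p ≤ getI Q m := by
  induction k with
  | zero =>
    obtain ⟨m, hm, hnn⟩ := h
    interval_cases m
    exact ⟨0, le_refl _, hnn, fun p hp hnp => by interval_cases p; exact le_refl _⟩
  | succ k ih =>
    by_cases hex : ∃ m, m ≤ k ∧ 0 ≤ getI Q m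
    · obtain ⟨m, hm, hnn, hmax⟩ := ih hex
      by_cases hk1 : 0 ≤ getI Q (k + 1) ∧ getI Q m ≤ getI Q (k + 1)
      · exact ⟨k + 1, le_refl _, hk1.1, fun p hp hnp => by
          rcases Nat.lt_or_ge p (k + 1) with h' | h'
          · exact le_trans (hmax p (by omega) hnp) hk1.2
          · have : p = k + 1 := by omega
            subst this; exact le_refl _⟩
      · refine ⟨m, by omega, hnn, fun p hp hnp => ?_⟩
        rcases Nat.lt_or_ge p (k + 1) with h' | h'
        · exact hmax p (by omega) hnp
        · have : p = k + 1 := by omega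
          subst this; push Not at hk1; omega
    · obtain ⟨m, hm, hnn⟩ := h
      have hm1 : m = k + 1 := by
        by_contra hc
        exact hex ⟨m, by omega, hnn⟩
      subst hm1
      refine ⟨k + 1, le_refl _, hnn, fun p hp hnp => ?_⟩
      have : p = k + 1 := by
        by_contra hc
        exact hex ⟨p, by omega, hnp⟩
      subst this; exact le_refl _

theorem drop_eq_of_agree {Q R : List Int} {u : Nat} (hl : R.length = Q.length)
    (h : ∀ q, u ≤ q → q < Q.length → getI R q = getI Q q) : R.drop u = Q.drop u := by
  apply List.ext_getElem?
  intro i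
  rw [List.getElem?_drop, List.getElem?_drop]
  rcases Nat.lt_or_ge (u + i) Q.length with h' | h'
  · rw [List.getElem?_eq_getElem (by omega), List.getElem?_eq_getElem h']
    have := h (u + i) (by omega) h'
    rw [getI_eq_getElem _ _ (by omega), getI_eq_getElem _ _ h'] at this
    simpa using this
  · rw [List.getElem?_eq_none (by omega), List.getElem?_eq_none (by omega)]

theorem nnf_take_perm {Q R : List Int} {u : Nat} (hl : R.length = Q.length)
    (hperm : (nnf R).Perm (nnf Q))
    (h : ∀ q, u ≤ q → q < Q.length → getI R q = getI Q q) :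
    (nnf (R.take u)).Perm (nnf (Q.take u)) := by
  have hdec : ∀ (X : List Int), nnf X = nnf (X.take u) ++ nnf (X.drop u) := by
    intro X
    rw [nnf, nnf, nnf, ← List.filter_append, List.take_append_drop]
  have hd : R.drop u = Q.drop u := drop_eq_of_agree hl h
  rw [hdec R, hdec Q, hd] at hperm
  exact (List.perm_append_right_iff _).mp hperm

theorem DomGe_transfer {Q R : List Int} {k : Nat} (hR : Reach Q R)
    (h : ∀ q, k ≤ q → q < Q.length → getI R q = getI Q q) (hD : DomGe k Q) : DomGe k R := by
  obtain ⟨⟨hl, _⟩, hperm⟩ := hR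
  intro p q hpq hq hkq hnp hnq
  have hq' : q < Q.length := by omega
  have hRq : getI R q = getI Q q := h q hkq hq'
  rcases Nat.lt_or_ge p k with hpk | hpk
  · -- R[p] is in the non-negative multiset of the prefix of Q
    have hmem : getI R p ∈ nnf (R.take k) := by
      rw [mem_nnf]
      refine ⟨?_, hnp⟩
      have hpR : p < R.length := by omega
      have : (R.take k)[p]'(by simp; omega) = R[p] := by simp
      rw [getI_eq_getElem _ _ hpR, ← this]
      exact List.getElem_mem _
    have hmem2 : getI R p ∈ nnf (Q.take k) :=
      (nnf_take_perm hl hperm h).mem_iff.mp hmem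
    rw [mem_nnf] at hmem2
    obtain ⟨hmem2, _⟩ := hmem2
    obtain ⟨idx, hidx, heq⟩ := List.mem_iff_getElem.mp hmem2
    have hidxQ : idx < Q.length := by
      have := hidx; simp at this; omega
    have hidxk : idx < k := by
      have := hidx; simp at this; omega
    have heq' : getI Q idx = getI R p := by
      rw [getI_eq_getElem _ _ hidxQ, ← heq]; simp
    rw [← heq', hRq]
    exact hD idx q (by omega) hq' hkq (heq' ▸ hnp) (hRq ▸ hnq)
  · rw [hRq, h p hpk (by omega)]
    exact hD p q hpq hq' hkq (by rwa [← h p hpk (by omega)]) (by rwa [← hRq])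

-- the max-tracking invariant carried through one pass
def CInv (Q : List Int) (t k : Nat) : Prop :=
  (∃ m, t ≤ m ∧ m ≤ k ∧ 0 ≤ getI Q m) →
  ∃ m, t ≤ m ∧ m ≤ k ∧ 0 ≤ getI Q m ∧ ∀ p, p ≤ k → 0 ≤ getI Q p → getI Q p ≤ getI Q m

theorem passFrom_invariant (P : List Int) (k : Nat) (hD : DomGe (k + 1) P) :
    ∀ (d t : Nat) (Q : List Int), d = k - t → t ≤ k → k < Q.length → Q.length = P.length →
    Reach P Q → (∀ q, k < q → q < Q.length → getI Q q = getI P q) → CInv Q t k →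
    Reach P (PassFrom Q t k) ∧
      (∀ q, k < q → q < P.length → getI (PassFrom Q t k) q = getI P q) ∧
      CInv (PassFrom Q t k) k k := by
  intro d
  induction d using Nat.strong_induction_on with
  | _ d ih =>
    intro t Q hd htk hkQ hlQ hReach hsuf hC
    by_cases htlt : t < k
    · rw [PassFrom, if_pos htlt]
      have hDQ : DomGe (k + 1) Q :=
        DomGe_transfer hReach (fun q hq hq' => hsuf q (by omega) (by omega)) hD
      rcases pvWhile_spec Q t (Q.length - (t + 0)) 0 rfl with ⟨heq, hall⟩ | ⟨j, hj1, hj2, hj3, hj4, hj5, hj6, hj7⟩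
      · -- no swap fired
        rw [heq]
        refine ih (k - (t + 1)) (by omega) (t + 1) Q rfl (by omega) hkQ hlQ hReach hsuf ?_
        intro hex'
        obtain ⟨m', hm'1, hm'2, hm'3⟩ := hex'
        obtain ⟨m, hm1, hm2, hm3, hmax⟩ := hC ⟨m', by omega, hm'2, hm'3⟩
        rcases Nat.lt_or_ge m (t + 1) with hmt | hmt
        · -- the max sat at t; every later non-negative matches it, use m'
          have hmt' : m = t := by omega
          subst hmt'
          refine ⟨m', hm'1, hm'2, hm'3, fun p hp hnp => ?_⟩
          have h1 : getI Q p ≤ getI Q m := hmax p hp hnp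
          have h2 : getI Q m ≤ getI Q m' := hall m' (by omega) (by omega) hm3 hm'3
          omega
        · exact ⟨m, hmt, hm2, hm3, hmax⟩
      · -- the first admissible j was swapped with t
        have htj : t < j := by
          rcases Nat.lt_or_ge t j with h' | h'
          · exact h'
          · have : t = j := by omega
            subst this; omega
        have hjk : j ≤ k := by
          by_contra hc
          have := hDQ t j htj hj2 (by omega) hj4 hj5
          omega
        have htn : t < Q.length := by omega
        have hne : t ≠ j := by omega
        have hR' : Reach P (swapAt Q t j) :=
          Reach_trans hReach (Reach_swapAt Q t j htn hj2 hne hj4 hj5)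
        have hlen' : (swapAt Q t j).length = Q.length := length_swapAt ..
        rw [hj7]
        refine ih (k - (t + 1)) (by omega) (t + 1) (swapAt Q t j) rfl (by omega)
          (by omega) (by omega) hR' ?_ ?_
        · intro q hq hq'
          rw [getI_swapAt Q t j q htn hj2 hne, if_neg (by omega), if_neg (by omega)]
          exact hsuf q hq (by omega)
        · intro _
          obtain ⟨m, hm1, hm2, hm3, hmax⟩ := hC ⟨t, le_refl _, by omega, hj4⟩
          have hmj : m ≠ j := by
            intro hc
            have := hmax t (by omega) hj4
            subst hc; omega
          by_cases hmt : m = t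
          · refine ⟨j, by omega, hjk, ?_, ?_⟩
            · rw [getI_swapAt Q t j j htn hj2 hne, if_pos rfl]
              exact hj4
            · intro p hp hnp
              rw [getI_swapAt Q t j j htn hj2 hne, if_pos rfl]
              rw [getI_swapAt Q t j p htn hj2 hne] at hnp ⊢
              subst hmt
              split_ifs at hnp ⊢ with h1 h2
              · exact hmax m (by omega) hj4
              · exact hmax j (by omega) hj5
              · exact hmax p hp hnp
          · refine ⟨m, by omega, hm2, ?_, ?_⟩
            · rw [getI_swapAt Q t j m htn hj2 hne, if_neg hmj, if_neg hmt]
              exact hm3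
            · intro p hp hnp
              rw [getI_swapAt Q t j m htn hj2 hne, if_neg hmj, if_neg hmt]
              rw [getI_swapAt Q t j p htn hj2 hne] at hnp ⊢
              split_ifs at hnp ⊢ with h1 h2
              · exact hmax t (by omega) hj4
              · exact hmax j (by omega) hj5
              · exact hmax p hp hnp
    · rw [PassFrom, if_neg htlt]
      have : t = k := by omega
      subst this
      exact ⟨hReach, fun q hq hq' => hsuf q hq (by omega), hC⟩

theorem pass_post {Q : List Int} {k : Nat} (hk : k < Q.length) (hD : DomGe (k + 1) Q) :
    Reach Q (PassFrom Q 0 k) ∧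
      (∀ q, k < q → q < Q.length → getI (PassFrom Q 0 k) q = getI Q q) ∧
      DomGe k (PassFrom Q 0 k) := by
  have hCI : CInv Q 0 k := by
    intro hex
    obtain ⟨m, _, hm2, hm3⟩ := hex
    obtain ⟨m', hm'1, hm'2, hmax⟩ := maxex k Q ⟨m, hm2, hm3⟩
    exact ⟨m', by omega, hm'1, hm'2, hmax⟩
  obtain ⟨hR, hsuf, hC⟩ := passFrom_invariant Q k hD k 0 Q rfl (by omega) hk rfl
    (Reach_refl Q) (fun q _ _ => rfl) hCI
  refine ⟨hR, fun q hq hq' => hsuf q hq hq', ?_⟩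
  intro p q hpq hq hkq hnp hnq
  rcases Nat.lt_or_ge q (k + 1) with h' | h'
  · have hqk : q = k := by omega
    subst hqk
    obtain ⟨m, hm1, hm2, hm3, hmax⟩ := hC ⟨q, le_refl _, le_refl _, hnq⟩
    have : m = q := by omega
    subst this
    exact hmax p (by omega) hnp
  · have hD' : DomGe (k + 1) (PassFrom Q 0 k) :=
      DomGe_transfer hR (fun q hq hq' => hsuf q (by omega) hq') hD
    exact hD' p q hpq hq (by omega) hnp hnq

theorem outer_post : ∀ (k : Nat) (Q : List Int), k < Q.length → DomGe (k + 1) Q →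
    Reach Q (OuterRec k Q) ∧ DomGe 1 (OuterRec k Q) := by
  intro k
  induction k with
  | zero => exact fun Q _ hD => ⟨Reach_refl Q, hD⟩
  | succ k ih =>
    intro Q hk hD
    obtain ⟨hR, _, hD'⟩ := pass_post (k := k + 1) hk hD
    have hlen : (PassFrom Q 0 (k + 1)).length = Q.length := (hR.1).1
    obtain ⟨hR2, hD2⟩ := ih (PassFrom Q 0 (k + 1)) (by omega) hD'
    exact ⟨Reach_trans hR hR2, hD2⟩

-- bridges: the Python folds are the Nat-indexed loops
theorem bridge_inner (k : Nat) : ∀ (dd t : Nat) (Q : List Int), dd = k - t →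
    (PySem.List.pyRange (t : Int) (k : Int) 1).foldl (fun acc i => pvWhile acc i.toNat 0) Q =
      PassFrom Q t k := by
  intro dd
  induction dd using Nat.strong_induction_on with
  | _ dd ih =>
    intro t Q hdd
    by_cases htk : t < k
    · rw [PySem.List.pyRange_one_cons (by exact_mod_cast htk), List.foldl_cons]
      rw [PassFrom, if_pos htk]
      have : ((t : Int) + 1) = ((t + 1 : Nat) : Int) := by push_cast; ring
      rw [this]
      have harg : pvWhile Q ((t : Int)).toNat 0 = pvWhile Q t 0 := by
        norm_num
      rw [harg]
      exact ih (k - (t + 1)) (by omega) (t + 1) (pvWhile Q t 0) rfl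
    · rw [PySem.List.pyRange_one_eq_nil (by exact_mod_cast Nat.le_of_not_lt htk)]
      rw [PassFrom, if_neg htk]
      rfl

theorem bridge_outer : ∀ (k : Nat) (Q : List Int),
    (PySem.List.pyRange (k : Int) 0 (-1)).foldl
      (fun acc outerLoop =>
        (PySem.List.pyRange 0 outerLoop 1).foldl (fun acc2 i => pvWhile acc2 i.toNat 0) acc)
      Q = OuterRec k Q := by
  intro k
  induction k with
  | zero =>
    intro Q
    rw [PySem.List.pyRange_neg_one_eq_nil (by norm_num)]
    rfl
  | succ k ih =>
    intro Q
    rw [PySem.List.pyRange_neg_one_cons (by exact_mod_cast Nat.succ_pos k), List.foldl_cons]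
    have h1 : ((k + 1 : Nat) : Int) - 1 = (k : Int) := by push_cast; ring
    rw [h1, ih]
    have h2 : (PySem.List.pyRange 0 ((k + 1 : Nat) : Int) 1).foldl
        (fun acc2 i => pvWhile acc2 i.toNat 0) Q = PassFrom Q 0 (k + 1) := by
      have := bridge_inner (k + 1) ((k + 1) - 0) 0 Q rfl
      simpa using this
    rw [h2]
    rfl

theorem A_char (L : List Int) : Reach L (dontCareNegative L) ∧ DomGe 1 (dontCareNegative L) := by
  cases hL : L with
  | nil =>
    constructor
    · exact Reach_refl _
    · intro p q _ hq _ _ _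
      simp [dontCareNegative] at hq
  | cons a L' =>
    have hlen : 1 ≤ L.length := by rw [hL]; simp
    have hcast : ((L.length : Int) - 1) = ((L.length - 1 : Nat) : Int) := by
      push_cast [hlen]; ring
    have hA : dontCareNegative L = OuterRec (L.length - 1) L := by
      rw [dontCareNegative, hcast, bridge_outer]
    rw [← hL]
    rw [hA]
    apply outer_post (L.length - 1) L (by omega)
    intro p q hpq hq hkq _ _
    omega

-- B-side lemmas
theorem length_scat (xs : List Int) : ∀ vs, (scat xs vs).length = xs.length := by
  induction xs with
  | nil => intro vs; rfl
  | cons x xs ih =>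
    intro vs
    by_cases h : 0 ≤ x <;> simp [scat, h, ih]

theorem nnf_scat (xs : List Int) : ∀ vs, (∀ v ∈ vs, 0 ≤ v) → vs.length = (nnf xs).length →
    nnf (scat xs vs) = vs := by
  induction xs with
  | nil =>
    intro vs _ hlen
    simp [nnf] at hlen
    simp [scat, nnf, hlen]
  | cons x xs ih =>
    intro vs hnn hlen
    by_cases hx : 0 ≤ x
    · have hx' : (nnf (x :: xs)).length = (nnf xs).length + 1 := by simp [nnf, hx]
      cases vs with
      | nil => rw [hx'] at hlen; simp at hlen
      | cons v vs' =>
        have hv : 0 ≤ v := hnn v (by simp)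
        rw [scat]
        rw [if_pos hx]
        simp only [List.headD_cons, List.tail_cons]
        have : nnf (v :: scat xs vs') = v :: nnf (scat xs vs') := by simp [nnf, hv]
        rw [this, ih vs' (fun w hw => hnn w (by simp [hw])) (by rw [hx'] at hlen; simpa using hlen)]
    · have hx' : nnf (x :: xs) = nnf xs := by simp [nnf, hx]
      rw [scat, if_neg hx]
      have : nnf (x :: scat xs vs) = nnf (scat xs vs) := by
        simp [nnf, hx]
      rw [this, ih vs hnn (by rw [hx'] at hlen; exact hlen)]

theorem Shape_scat (xs : List Int) : ∀ vs, (∀ v ∈ vs, 0 ≤ v) → vs.length = (nnf xs).length →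
    Shape xs (scat xs vs) := by
  induction xs with
  | nil => intro vs _ _; exact ⟨rfl, fun p hp => by simp at hp⟩
  | cons x xs ih =>
    intro vs hnn hlen
    refine ⟨by rw [length_scat], fun p hp => ?_⟩
    by_cases hx : 0 ≤ x
    · have hx' : (nnf (x :: xs)).length = (nnf xs).length + 1 := by simp [nnf, hx]
      cases vs with
      | nil => rw [hx'] at hlen; simp at hlen
      | cons v vs' =>
        have hv : 0 ≤ v := hnn v (by simp)
        have hrec := ih vs' (fun w hw => hnn w (by simp [hw])) (by rw [hx'] at hlen; simpa using hlen)
        rw [scat, if_pos hx]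
        simp only [List.headD_cons, List.tail_cons]
        cases p with
        | zero =>
          constructor
          · intro hneg
            rw [getI_cons_zero] at hneg
            exact absurd hneg (by omega)
          · intro _
            rw [getI_cons_zero]
            exact hv
        | succ p => exact hrec.2 p (by simpa using hp)
    · have hx' : nnf (x :: xs) = nnf xs := by simp [nnf, hx]
      have hrec := ih vs hnn (by rw [hx'] at hlen; exact hlen)
      rw [scat, if_neg hx]
      cases p with
      | zero =>
        constructor
        · intro _
          rfl
        · intro hpos
          rw [getI_cons_zero] at hpos
          rw [getI_cons_zero]
          exact hpos
      | succ p => exact hrec.2 p (by simpa using hp)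

theorem headD_drop (vs : List Int) (j : Nat) : (vs.drop j).headD 0 = vs.getD j 0 := by
  simp [List.head?_drop, List.getD_eq_getElem?_getD]

theorem take_succ_set (Q : List Int) (t : Nat) (v : Int) (h : t < Q.length) :
    (Q.set t v).take (t + 1) = Q.take t ++ [v] := by
  induction Q generalizing t with
  | nil => simp at h
  | cons a Q ih =>
    cases t with
    | zero => simp
    | succ t => simp [List.set_cons_succ, List.take_succ_cons, ih t (by simpa using h)]

theorem scat_bridge (vs : List Int) : ∀ (d t : Nat) (Q : List Int) (j : Nat),
    d = Q.length - t → t ≤ Q.length →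
    ((PySem.List.pyRange (t : Int) (Q.length : Int) 1).foldl
        (fun (st : List Int × Nat) idx =>
          if 0 ≤ st.1.getD idx.toNat 0 then (st.1.set idx.toNat (vs.getD st.2 0), st.2 + 1)
          else st)
        (Q, j)).1 = Q.take t ++ scat (Q.drop t) (vs.drop j) := by
  intro d
  induction d using Nat.strong_induction_on with
  | _ d ih =>
    intro t Q j hd htQ
    by_cases htn : t < Q.length
    · rw [PySem.List.pyRange_one_cons (by exact_mod_cast htn), List.foldl_cons]
      have htoNat : ((t : Int)).toNat = t := by norm_num
      rw [htoNat]
      have hget : Q.getD t 0 = getI Q t := rfl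
      have hdropQ : Q.drop t = Q[t] :: Q.drop (t + 1) := List.drop_eq_getElem_cons htn
      have hgetEl : getI Q t = Q[t] := getI_eq_getElem Q t htn
      by_cases hc : 0 ≤ Q.getD t 0
      · rw [if_pos hc]
        have hlen' : (Q.set t (vs.getD j 0)).length = Q.length := by simp
        have hcast : ((t : Int) + 1) = ((t + 1 : Nat) : Int) := by push_cast; ring
        have := ih (Q.length - (t + 1)) (by omega) (t + 1) (Q.set t (vs.getD j 0)) (j + 1)
          (by rw [hlen']) (by omega)
        rw [hlen'] at this
        rw [hcast, this]
        rw [take_succ_set Q t _ htn, List.drop_set, if_pos (by omega)]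
        rw [hdropQ, scat, if_pos (by rw [hget, hgetEl] at hc; exact hc)]
        rw [headD_drop, List.tail_drop]
        simp
      · rw [if_neg hc]
        have hcast : ((t : Int) + 1) = ((t + 1 : Nat) : Int) := by push_cast; ring
        have := ih (Q.length - (t + 1)) (by omega) (t + 1) Q j rfl (by omega)
        rw [hcast, this]
        rw [hdropQ, scat, if_neg (by rw [hget, hgetEl] at hc; exact hc)]
        rw [List.take_add_one, List.getElem?_eq_getElem htn, Option.toList_some,
          List.append_assoc, List.singleton_append]
    · have ht : t = Q.length := by omega
      subst ht
      rw [PySem.List.pyRange_one_eq_nil (le_refl _)]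
      simp [scat]

theorem B_char (L : List Int) :
    dontCareNegative_alt L = scat L (PySem.List.sorted (nnf L) (fun x => x) false) := by
  rw [dontCareNegative_alt]
  have hgather : L.foldl (fun acc x => if 0 ≤ x then acc ++ [x] else acc) ([] : List Int) = nnf L := by
    have := PySem.List.foldl_append_if (fun x : Int => decide (0 ≤ x)) (fun x => x) L []
    simp only [decide_eq_true_eq, List.map_id_fun', id] at this
    rw [this, nnf]
    simp
  simp only [hgather]
  have := scat_bridge (PySem.List.sorted (nnf L) (fun x => x) false) L.length 0 L 0 rfl (by omega)
  simpa using this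

-- sortedness of the non-negative subsequence from DomGe 1
theorem domge_pairwise : ∀ (R : List Int),
    (∀ p q, p < q → q < R.length → 0 ≤ getI R p → 0 ≤ getI R q → getI R p ≤ getI R q) →
    (nnf R).Pairwise (· ≤ ·) := by
  intro R
  induction R with
  | nil => intro _; simp [nnf]
  | cons x R' ih =>
    intro h
    have hrec := ih (fun p q hpq hq hnp hnq =>
      h (p + 1) (q + 1) (by omega) (by simpa using Nat.succ_lt_succ hq)
        (by simpa [getI_cons_succ] using hnp) (by simpa [getI_cons_succ] using hnq))
    by_cases hx : 0 ≤ x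
    · have : nnf (x :: R') = x :: nnf R' := by simp [nnf, hx]
      rw [this]
      refine List.Pairwise.cons (fun y hy => ?_) hrec
      rw [mem_nnf] at hy
      obtain ⟨hyR, hy0⟩ := hy
      obtain ⟨q, hq, hqy⟩ := List.mem_iff_getElem.mp hyR
      have := h 0 (q + 1) (by omega) (by simpa using Nat.succ_lt_succ hq)
        (by simpa [getI_cons_zero] using hx)
        (by rw [getI_cons_succ, getI_eq_getElem _ _ hq, hqy]; exact hy0)
      rw [getI_cons_zero, getI_cons_succ, getI_eq_getElem _ _ hq, hqy] at this
      exact this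
    · have : nnf (x :: R') = nnf R' := by simp [nnf, hx]
      rw [this]
      exact hrec

-- reconstruction: Shape + equal non-negative subsequences determine the list
theorem Shape_tail {a b : Int} {Q R : List Int} (h : Shape (a :: Q) (b :: R)) : Shape Q R := by
  obtain ⟨hl, hp⟩ := h
  refine ⟨by simpa using hl, fun p hpl => ?_⟩
  have := hp (p + 1) (by simpa using Nat.succ_lt_succ hpl)
  simpa [getI_cons_succ] using this

theorem reconstruct : ∀ (Q R S : List Int), Shape Q R → Shape Q S → nnf R = nnf S → R = S := by
  intro Q
  induction Q with
  | nil =>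
    intro R S hR hS _
    rw [List.length_eq_zero_iff.mp hR.1, List.length_eq_zero_iff.mp hS.1]
  | cons a Q' ih =>
    intro R S hR hS hnnf
    cases R with
    | nil => exact absurd hR.1 (by simp)
    | cons r R' =>
      cases S with
      | nil => exact absurd hS.1 (by simp)
      | cons s S' =>
        have h0R := hR.2 0 (by simp)
        have h0S := hS.2 0 (by simp)
        simp only [getI_cons_zero] at h0R h0S
        by_cases ha : 0 ≤ a
        · have hr : 0 ≤ r := h0R.2 ha
          have hs : 0 ≤ s := h0S.2 ha
          rw [show nnf (r :: R') = r :: nnf R' by simp [nnf, hr],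
            show nnf (s :: S') = s :: nnf S' by simp [nnf, hs]] at hnnf
          obtain ⟨hrs, htl⟩ := List.cons.injEq .. ▸ hnnf
          rw [hrs, ih R' S' (Shape_tail hR) (Shape_tail hS) htl]
        · have hr : r = a := h0R.1 (by omega)
          have hs : s = a := h0S.1 (by omega)
          rw [show nnf (r :: R') = nnf R' by simp [nnf, hr, ha],
            show nnf (s :: S') = nnf S' by simp [nnf, hs, ha]] at hnnf
          rw [hr, hs, ih R' S' (Shape_tail hR) (Shape_tail hS) hnnf]

-- ===== VERDICT (by name: the statement is the Claim_ definition above) =====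
theorem dontCareNegative_spec : Claim_equal_dontCareNegative := by
  intro L _
  unfold Spec_dontCareNegative
  obtain ⟨⟨hAshape, hApoint⟩, hAperm⟩ := (A_char L).1
  have hAdom := (A_char L).2
  set svals := PySem.List.sorted (nnf L) (fun x => x) false with hsvals
  have hsnn : ∀ v ∈ svals, 0 ≤ v := by
    intro v hv
    rw [hsvals, PySem.List.mem_sorted] at hv
    exact (mem_nnf.mp hv).2
  have hslen : svals.length = (nnf L).length := PySem.List.length_sorted ..
  have hBshape : Shape L (dontCareNegative_alt L) := by
    rw [B_char]; exact Shape_scat L svals hsnn hslen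
  have hBnnf : nnf (dontCareNegative_alt L) = svals := by
    rw [B_char]; exact nnf_scat L svals hsnn hslen
  -- the two non-negative subsequences are sorted permutations of each other, hence equal
  have hApair : (nnf (dontCareNegative L)).Pairwise (· ≤ ·) :=
    domge_pairwise _ (fun p q hpq hq hnp hnq => hAdom p q hpq hq (by omega) hnp hnq)
  have hBpair : (nnf (dontCareNegative_alt L)).Pairwise (· ≤ ·) := by
    rw [hBnnf, hsvals]
    have := PySem.List.sorted_pairwise (nnf L) (fun x : Int => x)
    simpa using this
  have hBperm : (nnf (dontCareNegative_alt L)).Perm (nnf L) := by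
    rw [hBnnf, hsvals]
    exact PySem.List.sorted_perm ..
  have hEq : nnf (dontCareNegative L) = nnf (dontCareNegative_alt L) :=
    List.Perm.eq_of_pairwise (fun a b _ _ h1 h2 => le_antisymm h1 h2) hApair hBpair
      (hAperm.trans hBperm.symm)
  exact reconstruct L _ _ ⟨hAshape, hApoint⟩ hBshape hEq
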